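-- pv_equiv track=rewrite | github.com/man-od/python_learn | python00/ex02/mfinder.py | check_m_pattern
-- ===== SOURCE A (Python) =====
-- def check_m_pattern(image):
--   if len(image) != 3 or any(len(row) != 5 for row in image):
--     return 'Error'
--   if ( image[0][0] == '*' and image[0][4] == '*' and
--        image[1][0] == '*' and image[1][2] == '*' and image[1][4] == '*' and
--        image[2][0] == '*' and image[2][2] == '*' and image[2][3] == '*' and image[2][4] == '*' ):
--     return 'True'
--   else:
--     return 'False'
-- ===== SOURCE B (Python) =====
-- NEEDED = (17, 21, 29)  # per-row bitmasks of mandatory '*' columns (bit i = column i)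
--
--
-- def _row_bits(row):
--     bits = 0
--     for i, ch in enumerate(row):
--         if ch == '*':
--             bits |= 2 ** i
--     return bits
--
--
-- def check_m_pattern(image):
--     if len(image) != 3 or any(len(row) != 5 for row in image):
--         return 'Error'
--     for row, need in zip(image, NEEDED):
--         if _row_bits(row) & need != need:
--             return 'False'
--     return 'True'
-- ===== Notes on version B (the rewrite author's own statement) =====
-- stated objective: alternative
-- what changed: A's nine-term hard-coded boolean conjunction of cell tests is replaced by encoding each row as an integer bitmask of its '*' cells and AND-testing it against a per-row mask of mandatory columns in a zip loop with early exit.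
import Mathlib
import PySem

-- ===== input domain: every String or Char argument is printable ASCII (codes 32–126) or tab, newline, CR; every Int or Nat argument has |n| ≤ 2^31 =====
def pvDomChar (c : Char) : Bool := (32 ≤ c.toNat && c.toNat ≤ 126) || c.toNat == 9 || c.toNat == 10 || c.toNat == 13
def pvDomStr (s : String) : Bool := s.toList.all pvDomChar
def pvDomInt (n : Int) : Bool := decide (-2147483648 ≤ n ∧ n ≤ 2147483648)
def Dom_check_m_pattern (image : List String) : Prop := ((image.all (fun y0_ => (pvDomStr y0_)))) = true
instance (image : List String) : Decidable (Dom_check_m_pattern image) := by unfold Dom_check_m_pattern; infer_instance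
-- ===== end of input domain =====

-- B replaces A's hard-coded nine-term conjunction of cell tests by a bitmask encoding:
-- each row is folded into an integer bitmask of its '*' cells and AND-tested against a
-- per-row mask of the mandatory columns; objective: alternative (same asymptotic cost).

-- ===== PORT A =====
-- image[r][c] == '*' : list index then string index (in A it only runs under the size guard, so both indexings are in range)
def pvStarA (image : List String) (r c : Int) : Bool :=
  match PySem.List.pyGet? image r with
  | none => false
  | some row =>
    match PySem.Str.pyGet? row c with
    | none => false
    | some ch => ch == '*'

def check_m_pattern (image : List String) : String :=
  if image.length ≠ 3 ∨ image.any (fun row => PySem.Str.len row ≠ 5) then "Error"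
  else if pvStarA image 0 0 && pvStarA image 0 4 &&
          pvStarA image 1 0 && pvStarA image 1 2 && pvStarA image 1 4 &&
          pvStarA image 2 0 && pvStarA image 2 2 && pvStarA image 2 3 && pvStarA image 2 4
       then "True" else "False"

-- ===== PORT B =====
-- per-row bitmasks of mandatory '*' columns (bit i = column i), B's NEEDED
def pvNeeded : List Int := [17, 21, 29]

-- _row_bits: fold the row, OR-ing in 2**i for every '*' at index i
-- (enumerate yields Int indices ≥ 0; Python's 2 ** i is 2 ^ i.toNat there, exact)
def pvRowBitsL (cs : List Char) : Int :=
  (PySem.List.enumerate cs).foldl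
    (fun bits ic => if ic.2 == '*' then PySem.Int.bor bits (2 ^ ic.1.toNat) else bits) 0

def pvRowBits (row : String) : Int := pvRowBitsL row.toList

-- the zip loop with its early 'False' return
def pvLoopB : List (String × Int) → String
  | [] => "True"
  | (row, need) :: rest =>
    if PySem.Int.band (pvRowBits row) need ≠ need then "False" else pvLoopB rest

def check_m_pattern_alt (image : List String) : String :=
  if image.length ≠ 3 ∨ image.any (fun row => PySem.Str.len row ≠ 5) then "Error"
  else pvLoopB (image.zip pvNeeded)

-- ===== PRECONDITION & SPEC =====
def Spec_check_m_pattern (image : List String) (out : String) : Prop := out = check_m_pattern_alt image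
instance (image : List String) (out : String) : Decidable (Spec_check_m_pattern image out) := by unfold Spec_check_m_pattern; infer_instance

-- ===== CLAIM (what is proved, stated in full; the proofs are below) =====
def Claim_equal_check_m_pattern : Prop := ∀ (image : List String), Dom_check_m_pattern image → Spec_check_m_pattern image (check_m_pattern image)

-- ===== LEMMAS AND PROOFS =====

theorem pvLen5 {l : List Char} (h : l.length = 5) : ∃ a b c d e, l = [a, b, c, d, e] := by
  rcases l with _ | ⟨a, _ | ⟨b, _ | ⟨c, _ | ⟨d, _ | ⟨e, _ | ⟨f, t⟩⟩⟩⟩⟩⟩ <;>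
    first
      | exact ⟨a, b, c, d, e, rfl⟩
      | simp_all

-- on a 5-char row, the bitmask test against each NEEDED mask holds iff the cells it selects are all '*'
theorem pvRow17 (a b c d e : Char) :
    (PySem.Int.band (pvRowBitsL [a, b, c, d, e]) 17 = 17) ↔ (a = '*' ∧ e = '*') := by
  by_cases ha : a = '*' <;> by_cases hb : b = '*' <;> by_cases hc : c = '*' <;>
    by_cases hd : d = '*' <;> by_cases he : e = '*' <;>
    simp [pvRowBitsL, PySem.List.enumerate, ha, hb, hc, hd, he] <;> decide

theorem pvRow21 (a b c d e : Char) :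
    (PySem.Int.band (pvRowBitsL [a, b, c, d, e]) 21 = 21) ↔ (a = '*' ∧ c = '*' ∧ e = '*') := by
  by_cases ha : a = '*' <;> by_cases hb : b = '*' <;> by_cases hc : c = '*' <;>
    by_cases hd : d = '*' <;> by_cases he : e = '*' <;>
    simp [pvRowBitsL, PySem.List.enumerate, ha, hb, hc, hd, he] <;> decide

theorem pvRow29 (a b c d e : Char) :
    (PySem.Int.band (pvRowBitsL [a, b, c, d, e]) 29 = 29) ↔ (a = '*' ∧ c = '*' ∧ d = '*' ∧ e = '*') := by
  by_cases ha : a = '*' <;> by_cases hb : b = '*' <;> by_cases hc : c = '*' <;>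
    by_cases hd : d = '*' <;> by_cases he : e = '*' <;>
    simp [pvRowBitsL, PySem.List.enumerate, ha, hb, hc, hd, he] <;> decide

theorem check_m_pattern_spec : Claim_equal_check_m_pattern := by
  intro image _
  unfold Spec_check_m_pattern check_m_pattern check_m_pattern_alt
  by_cases hg : image.length ≠ 3 ∨ image.any (fun row => PySem.Str.len row ≠ 5)
  · rw [if_pos hg, if_pos hg]
  · rw [if_neg hg, if_neg hg]
    rw [not_or] at hg
    obtain ⟨hlen, hrows⟩ := hg
    rcases image with _ | ⟨r0, _ | ⟨r1, _ | ⟨r2, _ | ⟨r3, t⟩⟩⟩⟩ <;> simp_all [PySem.Str.len_eq]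
    obtain ⟨hl0, hl1, hl2⟩ := hrows
    obtain ⟨a0, b0, c0, d0, e0, h0⟩ := pvLen5 (by simpa using (show r0.length = 5 by exact_mod_cast hl0))
    obtain ⟨a1, b1, c1, d1, e1, h1⟩ := pvLen5 (by simpa using (show r1.length = 5 by exact_mod_cast hl1))
    obtain ⟨a2, b2, c2, d2, e2, h2⟩ := pvLen5 (by simpa using (show r2.length = 5 by exact_mod_cast hl2))
    simp only [pvLoopB, pvNeeded, pvRowBits, List.zip, List.zipWith, h0, h1, h2]
    simp only [pvStarA, PySem.Str.pyGet?, PySem.List.pyGet?, PySem.List.pyIdx?]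
    by_cases p0 : a0 = '*' ∧ e0 = '*' <;>
      by_cases p1 : a1 = '*' ∧ c1 = '*' ∧ e1 = '*' <;>
        by_cases p2 : a2 = '*' ∧ c2 = '*' ∧ d2 = '*' ∧ e2 = '*' <;>
          simp_all [pvRow17, pvRow21, pvRow29]
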